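-- pv_equiv track=rewrite | github.com/sahilcmd3/DSA-Questions | Leetcode/CRT/Migratory Birds.py | birds
-- ===== SOURCE A (Python) =====
-- def birds(arr):
--     mydict = {} #Hashmap
--
--     for i in arr:
--         if i in mydict:
--             mydict[i] += 1
--         else:
--             mydict[i] = 1
--
--     max_count = max(mydict.values())
--
--     req_list = [key for key, value in mydict.items() if value == max_count]
--     req_list.sort()
--
--     return req_list[0]
-- ===== SOURCE B (Python) =====
-- def birds(arr):
--     cnt = {}
--     for i in arr:
--         if i in cnt:
--             cnt[i] += 1
--         else:
--             cnt[i] = 1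
--
--     best = None
--     for k, c in cnt.items():
--         if best is None or c > best[1] or (c == best[1] and k < best[0]):
--             best = (k, c)
--
--     if best is None:
--         raise ValueError("empty arr")
--     return best[0]
-- ===== Notes on version B (the rewrite author's own statement) =====
-- stated objective: alternative
-- what changed: B keeps A's counting loop but replaces the max-of-values + filter + sort + take-first pipeline with a single reduction pass over the dict items that maintains one running best (count descending, key ascending) pair.
import Mathlib
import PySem

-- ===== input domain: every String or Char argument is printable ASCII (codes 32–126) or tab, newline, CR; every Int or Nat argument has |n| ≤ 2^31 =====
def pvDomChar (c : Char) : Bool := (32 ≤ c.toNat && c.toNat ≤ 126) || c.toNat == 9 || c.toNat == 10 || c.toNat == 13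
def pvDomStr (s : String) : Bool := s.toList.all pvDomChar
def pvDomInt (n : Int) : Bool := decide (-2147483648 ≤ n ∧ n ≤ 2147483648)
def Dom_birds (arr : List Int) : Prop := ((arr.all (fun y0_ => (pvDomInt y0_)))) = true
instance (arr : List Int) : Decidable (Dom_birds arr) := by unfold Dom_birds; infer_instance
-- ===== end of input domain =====

-- B replaces A's max + filter + sort + index pipeline by a single reduction pass over the
-- counting dict's items keeping one running best (count desc, key asc); same counting loop.

-- ===== PORT A =====
-- the body of A's counting loop: if i in mydict: mydict[i] += 1 else: mydict[i] = 1
def birdsCount (d : PySem.Dict Int Int) (i : Int) : PySem.Dict Int Int :=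
  if d.contains i then d.modify i 0 (· + 1) else d.insert i 1

def birds (arr : List Int) : Int :=
  let mydict := arr.foldl birdsCount PySem.Dict.empty
  -- max(mydict.values()); Python raises ValueError on an empty dict — excluded by Pre_birds
  match PySem.List.max? mydict.values (fun v => v) with
  | none => 0
  | some maxCount =>
    let reqList := (mydict.items.filter (fun kv => kv.2 == maxCount)).map Prod.fst
    let sortedList := PySem.List.sorted reqList (fun x => x) false
    (PySem.List.pyGet? sortedList 0).getD 0

-- ===== PORT B =====
-- the body of B's selection loop over cnt.items()
def birdsBest (b : Option (Int × Int)) (kc : Int × Int) : Option (Int × Int) :=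
  match b with
  | none => some kc
  | some (bk, bc) => if kc.2 > bc ∨ (kc.2 = bc ∧ kc.1 < bk) then some kc else some (bk, bc)

def birds_alt (arr : List Int) : Int :=
  let cnt := arr.foldl birdsCount PySem.Dict.empty
  match cnt.items.foldl birdsBest none with
  | none => 0   -- B raises ValueError here; excluded by Pre_birds
  | some b => b.1

-- ===== PRECONDITION & SPEC =====
-- A's max() raises ValueError on the empty dict, i.e. exactly on empty arr (B raises there too).
def Pre_birds (arr : List Int) : Prop := arr ≠ []
instance (arr : List Int) : Decidable (Pre_birds arr) := by unfold Pre_birds; infer_instance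
def pvWitness_birds : List Int := [1, 2, 2, 3]

def Spec_birds (arr : List Int) (out : Int) : Prop := out = birds_alt arr
instance (arr : List Int) (out : Int) : Decidable (Spec_birds arr out) := by unfold Spec_birds; infer_instance

-- ===== CLAIM (what is proved, stated in full; the proofs are below) =====
def Claim_equal_birds : Prop := ∀ (arr : List Int), Dom_birds arr → Pre_birds arr → Spec_birds arr (birds arr)

-- ===== LEMMAS AND PROOFS =====

lemma items_ne_of_contains (d : PySem.Dict Int Int) (i : Int) (h : d.contains i = true) :
    d.items ≠ [] := by
  simp [PySem.Dict.contains] at h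
  rcases d with ⟨l⟩
  rcases l with _ | ⟨p, t⟩ <;> simp_all

lemma birdsCount_items_ne (d : PySem.Dict Int Int) (i : Int) : (birdsCount d i).items ≠ [] := by
  unfold birdsCount
  split
  · rename_i h
    simp only [PySem.Dict.modify, PySem.Dict.insert]
    split
    · have := items_ne_of_contains d i h
      rcases d with ⟨l⟩
      rcases l with _ | ⟨p, t⟩ <;> simp_all
    · exact absurd h (by assumption)
  · simp only [PySem.Dict.insert]
    split <;> rename_i h
    · have := items_ne_of_contains d i h
      rcases d with ⟨l⟩
      rcases l with _ | ⟨p, t⟩ <;> simp_all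
    · simp

lemma fold_items_ne : ∀ (arr : List Int) (d : PySem.Dict Int Int),
    arr ≠ [] ∨ d.items ≠ [] → (arr.foldl birdsCount d).items ≠ [] := by
  intro arr
  induction arr with
  | nil => intro d h; simpa using h
  | cons a t ih =>
    intro d _
    simp only [List.foldl_cons]
    exact ih (birdsCount d a) (by
      rcases t with _ | _
      · right; exact birdsCount_items_ne d a
      · left; simp)

/-- Characterisation of B's selection fold: it returns an element of the list whose count is
maximal and whose key is minimal among maximal-count elements. -/
lemma bfold_char : ∀ (l : List (Int × Int)) (k c : Int),
    ∃ m, l.foldl birdsBest (some (k, c)) = some m ∧ m ∈ (k, c) :: l ∧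
      ∀ p ∈ (k, c) :: l, p.2 ≤ m.2 ∧ (p.2 = m.2 → m.1 ≤ p.1) := by
  intro l
  induction l with
  | nil =>
    intro k c
    exact ⟨(k, c), rfl, by simp, by simp⟩
  | cons q t ih =>
    intro k c
    simp only [List.foldl_cons]
    by_cases hc : q.2 > c ∨ (q.2 = c ∧ q.1 < k)
    · have hstep : birdsBest (some (k, c)) q = some (q.1, q.2) := by
        simp [birdsBest, hc]
      obtain ⟨m, hm, hmem, hbest⟩ := ih q.1 q.2
      refine ⟨m, by rw [hstep]; simpa using hm, ?_, ?_⟩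
      · rcases List.mem_cons.mp hmem with h | h <;> simp [h]
      · intro p hp
        have hq := hbest (q.1, q.2) (by simp)
        simp only [List.mem_cons] at hp
        rcases hp with h | h | h
        · -- p = (k, c), the loser of the first comparison
          subst h
          refine ⟨by rcases hc with h1 | ⟨h1, h2⟩ <;> omega, ?_⟩
          intro hpe
          rcases hc with h1 | ⟨h1, h2⟩
          · omega
          · have := hq.2 (by omega)
            simp only at this ⊢
            omega
        · subst h; simpa using hq
        · exact hbest p (by simp [h])
    · have hstep : birdsBest (some (k, c)) q = some (k, c) := by
        simp only [birdsBest]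
        rw [if_neg hc]
      obtain ⟨m, hm, hmem, hbest⟩ := ih k c
      refine ⟨m, by rw [hstep]; exact hm, ?_, ?_⟩
      · rcases List.mem_cons.mp hmem with h | h <;> simp [h]
      · intro p hp
        have hk := hbest (k, c) (by simp)
        push Not at hc
        simp only [List.mem_cons] at hp
        rcases hp with h | h | h
        · exact hbest p (by simp [h])
        · -- p = q, the loser of the first comparison
          subst h
          have h2 : p.2 ≤ c := by
            by_cases h2 : p.2 = c
            · omega
            · have := hc.1; omega
          refine ⟨by omega, ?_⟩
          intro hpe
          have hce : p.2 = c := by have := hk.1; omega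
          have := hc.2 hce
          have := hk.2 (by omega)
          omega
        · exact hbest p (by simp [h])

/-- The two post-processing phases agree on any nonempty items list. -/
lemma post_eq (l : List (Int × Int)) (hl : l ≠ []) :
    (match PySem.List.max? (l.map Prod.snd) (fun v => v) with
     | none => (0 : Int)
     | some maxCount =>
       (PySem.List.pyGet? (PySem.List.sorted ((l.filter (fun kv => kv.2 == maxCount)).map Prod.fst)
         (fun x => x) false) 0).getD 0)
    = (match l.foldl birdsBest none with | none => (0 : Int) | some b => b.1) := by
  rcases l with _ | ⟨q, t⟩
  · exact absurd rfl hl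
  -- B's fold
  have hstep0 : birdsBest none q = some (q.1, q.2) := rfl
  obtain ⟨m, hm, hmem, hbest⟩ := bfold_char t q.1 q.2
  have hB : (q :: t).foldl birdsBest none = some m := by
    simp only [List.foldl_cons, hstep0]
    simpa using hm
  -- A's max
  obtain ⟨mc, hmc⟩ : ∃ mc, PySem.List.max? ((q :: t).map Prod.snd) (fun v => v) = some mc := by
    rcases h : PySem.List.max? ((q :: t).map Prod.snd) (fun v => v) with _ | mc
    · rw [PySem.List.max?_eq_none_iff] at h; simp at h
    · exact ⟨mc, rfl⟩
  have hmem' : m ∈ q :: t := by simpa using hmem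
  have hmcmax : ∀ y ∈ (q :: t).map Prod.snd, y ≤ mc := by
    intro y hy; simpa using PySem.List.max?_isMax hmc y hy
  have hmc_mem : mc ∈ (q :: t).map Prod.snd := PySem.List.max?_mem hmc
  have hmc_eq : mc = m.2 := by
    obtain ⟨p, hp, hpe⟩ := List.mem_map.mp hmc_mem
    have h1 := (hbest p (by simpa using hp)).1
    have h2 := hmcmax m.2 (List.mem_map.mpr ⟨m, hmem', rfl⟩)
    omega
  -- the filtered key list contains m.1
  have hreq : m.1 ∈ ((q :: t).filter (fun kv => kv.2 == mc)).map Prod.fst := by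
    refine List.mem_map.mpr ⟨m, List.mem_filter.mpr ⟨hmem', ?_⟩, rfl⟩
    simp [hmc_eq]
  -- the sorted list is nonempty
  obtain ⟨h0, t', hs⟩ := List.exists_cons_of_ne_nil (l := PySem.List.sorted
      (((q :: t).filter (fun kv => kv.2 == mc)).map Prod.fst) (fun x => x) false) (by
    intro h
    have := (PySem.List.sorted_perm (((q :: t).filter (fun kv => kv.2 == mc)).map Prod.fst)
      (fun x => x) false)
    rw [h] at this
    exact absurd (this.symm.mem_iff.mp hreq) (List.not_mem_nil)
    )
  have hh0_mem : h0 ∈ ((q :: t).filter (fun kv => kv.2 == mc)).map Prod.fst := by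
    rw [← PySem.List.mem_sorted _ (fun x => x) false, hs]
    simp
  have hle : h0 ≤ m.1 := by
    exact PySem.List.key_head_sorted_le _ _ hs m.1 hreq
  have hge : m.1 ≤ h0 := by
    obtain ⟨p, hp, hpe⟩ := List.mem_map.mp hh0_mem
    obtain ⟨hpmem, hpc⟩ := List.mem_filter.mp hp
    have : p.2 = m.2 := by simp at hpc; omega
    have := (hbest p (by simpa using hpmem)).2 this
    omega
  have hh0 : h0 = m.1 := le_antisymm hle hge
  rw [hmc, hB]
  simp only [hs]
  simp [PySem.List.pyGet?, PySem.List.pyIdx?, hh0]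

-- ===== VERDICT (by name: the statement is the Claim_ definition above) =====
theorem birds_spec : Claim_equal_birds := by
  intro arr _ hpre
  unfold Spec_birds birds birds_alt
  simp only [PySem.Dict.values]
  exact post_eq (arr.foldl birdsCount PySem.Dict.empty).items
    (fold_items_ne arr PySem.Dict.empty (Or.inl hpre))
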